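-- pv_equiv track=rewrite | github.com/cresearch-se/automation | tests/TeamworkDB/test_principals_analysis.py | _choose_key_header
-- ===== SOURCE A (Python) =====
-- from typing import Optional, List, Dict, Any, Tuple
--
-- def _choose_key_header(headers: List[str]) -> str:
--     """
--     Choose a sensible key header from the list of headers.
--     Preference order: common id/name candidates, otherwise the first header.
--     """
--     candidates = ["id", "principal", "name", "employee", "employeeid", "employee_id"]
--     normalized = {h: "".join(ch for ch in (h or "").lower() if ch.isalnum()) for h in headers}
--     for cand in candidates:
--         for h, nh in normalized.items():
--             if cand == nh:
--                 return h
--     # fallback to first header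
--     return headers[0] if headers else ""
-- ===== SOURCE B (Python) =====
-- from typing import List
--
-- def _choose_key_header(headers: List[str]) -> str:
--     """Single pass over headers: rank each header by candidate priority and
--     keep the lowest-ranked one (ties broken by header order)."""
--     candidates = ["id", "principal", "name", "employee", "employeeid", "employee_id"]
--     rank = {c: i for i, c in enumerate(candidates)}
--     best_rank = len(candidates)
--     best_header = headers[0] if headers else ""
--     for h in headers:
--         nh = "".join(ch for ch in (h or "").lower() if ch.isalnum())
--         r = rank.get(nh)
--         if r is not None and r < best_rank:
--             best_rank = r
--             best_header = h
--     return best_header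
-- ===== Notes on version B (the rewrite author's own statement) =====
-- stated objective: alternative
-- what changed: Instead of building a header->normalized dict and scanning it once per candidate (candidate-major nested loops), B makes a single header-major pass keeping the header whose normalization has the smallest candidate rank (via a candidate->rank dict), ties broken by header order.
import Mathlib
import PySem

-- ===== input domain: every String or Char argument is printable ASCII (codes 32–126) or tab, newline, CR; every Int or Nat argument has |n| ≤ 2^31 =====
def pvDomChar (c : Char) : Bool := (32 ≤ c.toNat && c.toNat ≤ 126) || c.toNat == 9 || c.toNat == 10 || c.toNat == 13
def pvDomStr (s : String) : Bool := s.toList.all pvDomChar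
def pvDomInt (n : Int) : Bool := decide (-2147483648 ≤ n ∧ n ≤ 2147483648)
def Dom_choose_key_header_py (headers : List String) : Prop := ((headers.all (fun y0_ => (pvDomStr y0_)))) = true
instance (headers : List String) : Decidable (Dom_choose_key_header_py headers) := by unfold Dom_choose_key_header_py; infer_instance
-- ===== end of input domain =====

-- B replaces A's candidate-major nested scans over a normalized-header dict by one header-major
-- pass keeping the header of smallest candidate rank (alternative decomposition, same cost class).

-- ===== PORT A =====
-- "".join(ch for ch in (h or "").lower() if ch.isalnum()); for strings (h or "") = h (empty → "" = h)
def pyNorm (h : String) : String := String.ofList ((PySem.Chars.lower h.toList).filter PySem.Chars.isalnum)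

def pyCandidates : List String := ["id", "principal", "name", "employee", "employeeid", "employee_id"]

-- inner 'for h, nh in normalized.items(): if cand == nh: return h'
def chooseInner (cand : String) : List (String × String) → Option String
  | [] => none
  | (h, nh) :: rest => if cand == nh then some h else chooseInner cand rest

-- outer 'for cand in candidates: …' with early return
def chooseOuter (items : List (String × String)) : List String → Option String
  | [] => none
  | c :: cs =>
    match chooseInner c items with
    | some h => some h
    | none => chooseOuter items cs

def choose_key_header_py (headers : List String) : String :=
  let normalized : PySem.Dict String String :=
    headers.foldl (fun d h => d.insert h (pyNorm h)) PySem.Dict.empty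
  match chooseOuter normalized.items pyCandidates with
  | some h => h
  | none => match headers with | [] => "" | h :: _ => h

-- ===== PORT B =====
-- rank = {c: i for i, c in enumerate(candidates)}
def rankDict : PySem.Dict String Int :=
  PySem.Dict.ofList ((PySem.List.enumerate pyCandidates 0).map (fun p => (p.2, (p.1 : Int))))

def choose_key_header_py_alt (headers : List String) : String :=
  let init : Int × String :=
    ((pyCandidates.length : Int), match headers with | [] => "" | h :: _ => h)
  (headers.foldl (fun best h =>
      match rankDict.get? (pyNorm h) with
      | some r => if r < best.1 then (r, h) else best
      | none => best) init).2

-- ===== PRECONDITION & SPEC =====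
def Spec_choose_key_header_py (headers : List String) (out : String) : Prop := out = choose_key_header_py_alt headers
instance (headers : List String) (out : String) : Decidable (Spec_choose_key_header_py headers out) := by unfold Spec_choose_key_header_py; infer_instance

-- ===== CLAIM (what is proved, stated in full; the proofs are below) =====
def Claim_equal_choose_key_header_py : Prop := ∀ (headers : List String), Dom_choose_key_header_py headers → Spec_choose_key_header_py headers (choose_key_header_py headers)

-- ===== LEMMAS AND PROOFS =====

-- candidate rank of a header (6 = no candidate matches)
def rk (h : String) : Int := (rankDict.get? (pyNorm h)).getD 6

-- minimal rank over a list
def minRk (l : List String) : Int := l.foldr (fun h a => min (rk h) a) 6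

theorem rankDict_eq : rankDict = PySem.Dict.mk [("id",0),("principal",1),("name",2),("employee",3),("employeeid",4),("employee_id",5)] := by decide

theorem rank_get (nh : String) :
    rankDict.get? nh =
      if "id" = nh then some 0 else if "principal" = nh then some 1 else
      if "name" = nh then some 2 else if "employee" = nh then some 3 else
      if "employeeid" = nh then some 4 else if "employee_id" = nh then some 5 else none := by
  have h0 : (PySem.Dict.mk ([] : List (String × Int))).get? nh = none := rfl
  rw [rankDict_eq]
  simp only [PySem.Dict.get?_mk_cons, beq_iff_eq, h0]

theorem rk_nonneg (h : String) : 0 ≤ rk h := by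
  unfold rk
  rw [rank_get]
  split_ifs <;> simp

theorem minRk_nil : minRk [] = 6 := rfl

theorem minRk_cons (h : String) (t : List String) : minRk (h :: t) = min (rk h) (minRk t) := rfl

theorem minRk_le_six (l : List String) : minRk l ≤ 6 := by
  induction l with
  | nil => rw [minRk_nil]
  | cons h t ih => rw [minRk_cons]; exact le_trans (min_le_right _ _) ih

theorem le_minRk (l : List String) (j : Int) (hj : j ≤ 6) (hall : ∀ h ∈ l, j ≤ rk h) : j ≤ minRk l := by
  induction l with
  | nil => rw [minRk_nil]; omega
  | cons h t ih =>
    rw [minRk_cons]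
    exact le_min (hall h (List.mem_cons_self)) (ih (fun x hx => hall x (List.mem_cons_of_mem _ hx)))

theorem minRk_le_of_mem (l : List String) (h : String) (hm : h ∈ l) : minRk l ≤ rk h := by
  induction l with
  | nil => cases hm
  | cons x t ih =>
    rw [minRk_cons]
    rcases List.mem_cons.mp hm with rfl | hm'
    · exact min_le_left _ _
    · exact le_trans (min_le_right _ _) (ih hm')

theorem find?_isSome_of_minRk_lt (l : List String) (hlt : minRk l < 6) :
    (l.find? (fun h => rk h == minRk l)).isSome = true := by
  induction l with
  | nil => simp [minRk_nil] at hlt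
  | cons x t ih =>
    rw [minRk_cons] at hlt ⊢
    by_cases hx : rk x ≤ minRk t
    · have : min (rk x) (minRk t) = rk x := min_eq_left hx
      rw [this]
      simp [List.find?]
    · have hmt : min (rk x) (minRk t) = minRk t := min_eq_right (le_of_not_ge hx)
      rw [hmt] at hlt ⊢
      have hne : (rk x == minRk t) = false := by
        rw [beq_eq_false_iff_ne]
        omega
      rw [List.find?_cons_of_neg (p := fun h' => rk h' == minRk t) (ne_true_of_eq_false hne)]
      exact ih hlt

-- the normalized dict: lookups
theorem get?_build (l : List String) (d : PySem.Dict String String) (k : String) :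
    (l.foldl (fun d h => d.insert h (pyNorm h)) d).get? k =
      if k ∈ l then some (pyNorm k) else d.get? k := by
  induction l generalizing d with
  | nil => simp
  | cons h t ih =>
    simp only [List.foldl_cons, ih, List.mem_cons]
    by_cases hkt : k ∈ t
    · simp [hkt]
    · by_cases hk : k = h
      · subst hk; simp [hkt]
      · simp [hkt, hk, PySem.Dict.get?_insert]

-- the normalized dict: items are the deduped headers paired with their normalization
theorem items_build (headers : List String) :
    (headers.foldl (fun d h => d.insert h (pyNorm h)) PySem.Dict.empty).items =
      (PySem.Set.ofList headers).map (fun h => (h, pyNorm h)) := by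
  have hnd : (headers.foldl (fun d h => d.insert h (pyNorm h)) PySem.Dict.empty).keys.Nodup :=
    PySem.Dict.nodup_keys_foldl_insert headers (fun _ h => pyNorm h) _ (by simp)
  have hkeys : (headers.foldl (fun d h => d.insert h (pyNorm h)) PySem.Dict.empty).keys
      = PySem.Set.ofList headers := by
    rw [PySem.Dict.keys_foldl_insert headers (fun _ h => pyNorm h)]
    simp [PySem.Set.update_nil_left]
  rw [PySem.Dict.items_eq_map_keys _ hnd "", hkeys]
  apply List.map_congr_left
  intro k hk
  have hkmem : k ∈ headers := by rwa [PySem.Set.mem_ofList] at hk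
  have : (headers.foldl (fun d h => d.insert h (pyNorm h)) PySem.Dict.empty).get? k
      = some (pyNorm k) := by rw [get?_build]; simp [hkmem]
  simp [PySem.Dict.getD_of_get?_eq_some _ _ this]

theorem chooseInner_map (cand : String) (K : List String) :
    chooseInner cand (K.map (fun h => (h, pyNorm h))) = K.find? (fun h => cand == pyNorm h) := by
  induction K with
  | nil => rfl
  | cons x t ih =>
    simp only [List.map_cons, chooseInner, List.find?]
    by_cases hx : cand == pyNorm x
    · simp [hx]
    · simp only [hx, Bool.false_eq_true, if_false]
      simpa using ih

theorem find?_discard (p : String → Bool) (x : String) (hpx : p x = false) (s : List String) :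
    (PySem.Set.discard s x).find? p = s.find? p := by
  induction s with
  | nil => rfl
  | cons y t ih =>
    by_cases hy : y = x
    · subst hy
      have h1 : PySem.Set.discard (y :: t) y = PySem.Set.discard t y := by
        simp [PySem.Set.discard]
      rw [h1, ih]
      simp [List.find?, hpx]
    · have h1 : PySem.Set.discard (y :: t) x = y :: PySem.Set.discard t x := by
        simp [PySem.Set.discard, hy]
      rw [h1]
      cases hpy : p y with
      | true => simp [List.find?, hpy]
      | false => simp [List.find?, hpy, ih]

theorem find?_ofList (p : String → Bool) (xs : List String) :
    (PySem.Set.ofList xs).find? p = xs.find? p := by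
  induction xs with
  | nil => rfl
  | cons x t ih =>
    rw [PySem.Set.ofList_cons]
    cases hpx : p x with
    | true => simp [List.find?, hpx]
    | false => simp only [List.find?, hpx, find?_discard p x hpx, ih]

-- a header's normalization equals candidate i iff its rank is i
theorem bridge (i : Nat) (hi : i < 6) (h : String) :
    (pyCandidates[i]'(by simpa [pyCandidates] using hi) == pyNorm h) = (rk h == (i : Int)) := by
  unfold rk
  rw [rank_get]
  generalize pyNorm h = nh
  interval_cases i <;>
    simp only [pyCandidates, List.getElem_cons_zero, List.getElem_cons_succ] <;>
    split_ifs <;> simp_all <;> subst_vars <;> decide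

theorem chooseOuter_drop (l : List String) :
    ∀ (cs : List String) (i : Nat), pyCandidates.drop i = cs → (∀ h ∈ l, (i : Int) ≤ rk h) →
      chooseOuter ((PySem.Set.ofList l).map (fun h => (h, pyNorm h))) cs =
        if minRk l < 6 then l.find? (fun h => rk h == minRk l) else none := by
  intro cs
  induction cs with
  | nil =>
    intro i hdrop hall
    have hi : 6 ≤ i := by
      have := congrArg List.length hdrop
      simp [pyCandidates] at this
      omega
    have h6 : (6 : Int) ≤ minRk l :=
      le_minRk l 6 le_rfl (fun h hm => le_trans (by exact_mod_cast hi) (hall h hm))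
    rw [chooseOuter, if_neg (by omega)]
  | cons c cs' ih =>
    intro i hdrop hall
    have hilt : i < 6 := by
      by_contra hge
      have : pyCandidates.drop i = [] := List.drop_eq_nil_of_le (by simp [pyCandidates]; omega)
      rw [this] at hdrop; cases hdrop
    have hcons := List.drop_eq_getElem_cons (l := pyCandidates)
      (i := i) (by simpa [pyCandidates] using hilt)
    rw [hcons] at hdrop
    obtain ⟨hc, hcs'⟩ := List.cons.inj hdrop
    have hpred : (fun h => c == pyNorm h) = (fun h => rk h == (i : Int)) := by
      funext h
      rw [← hc]
      exact bridge i hilt h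
    rw [chooseOuter, chooseInner_map, find?_ofList, hpred]
    cases hfind : l.find? (fun h => rk h == (i : Int)) with
    | some h =>
      have hmem : h ∈ l := List.mem_of_find?_eq_some hfind
      have hrk : rk h = (i : Int) := by
        have := List.find?_some hfind
        simpa using this
      have hle : minRk l ≤ (i : Int) := hrk ▸ minRk_le_of_mem l h hmem
      have hge : (i : Int) ≤ minRk l := le_minRk l i (by omega) hall
      have hmin : minRk l = (i : Int) := le_antisymm hle hge
      rw [if_pos (by omega), hmin, hfind]
    | none =>
      have hall' : ∀ h ∈ l, ((i + 1 : Nat) : Int) ≤ rk h := by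
        intro h hm
        have hne : rk h ≠ (i : Int) := by
          intro heq
          have := List.find?_eq_none.mp hfind h hm
          simp [heq] at this
        have := hall h hm
        push_cast
        omega
      exact ih (i + 1) hcs' hall'

-- invariant of B's single pass
theorem bfold (l : List String) :
    ∀ (br : Int) (bh : String), br ≤ 6 →
      l.foldl (fun best h =>
          match rankDict.get? (pyNorm h) with
          | some r => if r < best.1 then (r, h) else best
          | none => best) (br, bh) =
        if minRk l < br then (minRk l, (l.find? (fun h => rk h == minRk l)).getD "") else (br, bh) := by
  induction l with
  | nil => intro br bh _; rw [if_neg (by rw [minRk_nil]; omega)]; rfl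
  | cons h t ih =>
    intro br bh hbr
    rw [List.foldl_cons]
    cases hget : rankDict.get? (pyNorm h) with
    | none =>
      have hrk : rk h = 6 := by unfold rk; rw [hget]; rfl
      have hmt : minRk (h :: t) = minRk t := by
        rw [minRk_cons, hrk, min_eq_right (minRk_le_six t)]
      rw [ih br bh hbr, hmt]
      by_cases hc : minRk t < br
      · have hne : (rk h == minRk t) = false := by rw [beq_eq_false_iff_ne]; omega
        rw [if_pos hc, if_pos hc,
          List.find?_cons_of_neg (p := fun h' => rk h' == minRk t) (ne_true_of_eq_false hne)]
      · rw [if_neg hc, if_neg hc]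
    | some r =>
      have hrk : rk h = r := by unfold rk; rw [hget]; rfl
      simp only
      by_cases hlt : r < br
      · rw [if_pos hlt, ih r h (by omega)]
        by_cases hc : minRk t < r
        · have hmin : minRk (h :: t) = minRk t := by
            rw [minRk_cons, hrk, min_eq_right (by omega)]
          have hne : (rk h == minRk t) = false := by rw [beq_eq_false_iff_ne]; omega
          rw [if_pos hc, if_pos (by rw [hmin]; omega), hmin,
            List.find?_cons_of_neg (p := fun h' => rk h' == minRk t) (ne_true_of_eq_false hne)]
        · have hmin : minRk (h :: t) = r := by
            rw [minRk_cons, hrk, min_eq_left (by omega)]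
          rw [if_neg hc, if_pos (by rw [hmin]; omega), hmin,
            List.find?_cons_of_pos (p := fun h' => rk h' == r) (by simp [hrk])]
          rfl
      · rw [if_neg hlt, ih br bh hbr]
        by_cases hc : minRk t < br
        · have hmin : minRk (h :: t) = minRk t := by
            rw [minRk_cons, hrk, min_eq_right (by omega)]
          have hne : (rk h == minRk t) = false := by rw [beq_eq_false_iff_ne]; omega
          rw [if_pos hc, if_pos (by rw [hmin]; omega), hmin,
            List.find?_cons_of_neg (p := fun h' => rk h' == minRk t) (ne_true_of_eq_false hne)]
        · have hge : ¬ minRk (h :: t) < br := by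
            rw [minRk_cons, hrk]
            omega
          rw [if_neg hc, if_neg hge]

-- ===== VERDICT (by name: the statement is the Claim_ definition above) =====
theorem choose_key_header_py_spec : Claim_equal_choose_key_header_py := by
  intro headers _
  unfold Spec_choose_key_header_py choose_key_header_py choose_key_header_py_alt
  simp only [items_build]
  rw [chooseOuter_drop headers pyCandidates 0 rfl (by intro h _; exact_mod_cast rk_nonneg h)]
  have hlen : ((pyCandidates.length : Int)) = 6 := by simp [pyCandidates]
  rw [hlen, bfold headers 6 _ le_rfl]
  by_cases hc : minRk headers < 6
  · rw [if_pos hc, if_pos hc]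
    cases hfind : headers.find? (fun h => rk h == minRk headers) with
    | none =>
      have := find?_isSome_of_minRk_lt headers hc
      rw [hfind] at this
      cases this
    | some h => rfl
  · rw [if_neg hc, if_neg hc]
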